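-- pv_equiv track=rewrite | github.com/BataJini/Website | authentication/management/commands/remove_polish_jobs.py | is_tech_job
-- ===== SOURCE A (Python) =====
-- def is_tech_job(title, description):
--     """
--     Detect if job is in IT/tech/development field
--     """
--     if not title and not description:
--         return False
--
--     # Convert to lowercase for comparison
--     title_lower = title.lower() if title else ''
--     desc_lower = description.lower() if description else ''
--
--     # Common IT/tech/development keywords
--     tech_keywords = [
--         'developer', 'engineer', 'programmer', 'software', 'frontend', 'backend',
--         'fullstack', 'full-stack', 'devops', 'sre', 'data', 'analyst', 'architect',
--         'qa', 'tester', 'cyber', 'security', 'it', 'tech', 'technical', 'web',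
--         'mobile', 'ios', 'android', 'cloud', 'aws', 'azure', 'gcp', 'python',
--         'java', 'javascript', 'react', 'angular', 'vue', 'node', 'ruby', 'php',
--         'c#', 'c++', 'go', 'rust', 'scala', 'kotlin', 'swift', 'sql', 'database',
--         'machine learning', 'ai', 'artificial intelligence', 'blockchain',
--         'devops', 'sre', 'infrastructure', 'network', 'system', 'admin'
--     ]
--
--     # Check if any tech keyword is in title or description
--     for keyword in tech_keywords:
--         if keyword in title_lower or keyword in desc_lower:
--             return True
--
--     return False
-- ===== SOURCE B (Python) =====
-- import re
--
-- TECH_KEYWORDS = [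
--     'developer', 'engineer', 'programmer', 'software', 'frontend', 'backend',
--     'fullstack', 'full-stack', 'devops', 'sre', 'data', 'analyst', 'architect',
--     'qa', 'tester', 'cyber', 'security', 'it', 'tech', 'technical', 'web',
--     'mobile', 'ios', 'android', 'cloud', 'aws', 'azure', 'gcp', 'python',
--     'java', 'javascript', 'react', 'angular', 'vue', 'node', 'ruby', 'php',
--     'c#', 'c++', 'go', 'rust', 'scala', 'kotlin', 'swift', 'sql', 'database',
--     'machine learning', 'ai', 'artificial intelligence', 'blockchain',
--     'devops', 'sre', 'infrastructure', 'network', 'system', 'admin'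
-- ]
--
-- # one compiled alternation of all keywords, escaped ('c#', 'c++')
-- _TECH_RE = re.compile('|'.join(re.escape(k) for k in TECH_KEYWORDS))
--
--
-- def is_tech_job(title, description):
--     return bool(_TECH_RE.search((title or '').lower())
--                 or _TECH_RE.search((description or '').lower()))
-- ===== Notes on version B (the rewrite author's own statement) =====
-- stated objective: idiomatic
-- what changed: Replaces A's per-keyword 'in' loop with early return by one compiled regex alternation of all escaped keywords, searched once per lowered string; the separate empty-input guard disappears (a search of an empty string simply finds nothing).
import Mathlib
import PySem

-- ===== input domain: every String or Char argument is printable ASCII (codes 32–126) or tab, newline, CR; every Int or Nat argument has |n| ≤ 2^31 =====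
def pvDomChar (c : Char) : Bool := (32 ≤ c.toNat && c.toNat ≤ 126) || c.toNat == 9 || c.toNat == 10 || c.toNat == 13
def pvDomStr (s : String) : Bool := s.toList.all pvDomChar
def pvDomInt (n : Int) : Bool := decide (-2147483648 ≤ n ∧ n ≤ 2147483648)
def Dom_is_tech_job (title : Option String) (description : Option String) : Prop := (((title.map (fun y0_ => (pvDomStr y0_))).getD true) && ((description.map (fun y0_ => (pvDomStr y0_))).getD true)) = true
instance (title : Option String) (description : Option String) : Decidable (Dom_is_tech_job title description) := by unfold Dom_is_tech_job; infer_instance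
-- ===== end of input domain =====

-- B replaces A's per-keyword substring loop by one compiled regex alternation of
-- all escaped keywords searched once per lowered string (objective: idiomatic).


-- the keyword list shared by both sources (same literal list in Source A and Source B)
def techKeywords : List String := [
  "developer", "engineer", "programmer", "software", "frontend", "backend",
  "fullstack", "full-stack", "devops", "sre", "data", "analyst", "architect",
  "qa", "tester", "cyber", "security", "it", "tech", "technical", "web",
  "mobile", "ios", "android", "cloud", "aws", "azure", "gcp", "python",
  "java", "javascript", "react", "angular", "vue", "node", "ruby", "php",
  "c#", "c++", "go", "rust", "scala", "kotlin", "swift", "sql", "database",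
  "machine learning", "ai", "artificial intelligence", "blockchain",
  "devops", "sre", "infrastructure", "network", "system", "admin"]

-- ===== PORT A =====
-- Python truthiness of an Optional[str]: None and '' are falsy
def pyTruthy (o : Option String) : Bool :=
  match o with
  | none => false
  | some s => !(s == "")

-- the 'for keyword in tech_keywords: if … return True' loop, early return kept
def loopA (t d : List Char) : List String → Bool
  | [] => false
  | k :: ks =>
    if PySem.Chars.isIn k.toList t || PySem.Chars.isIn k.toList d then true
    else loopA t d ks

def is_tech_job (title : Option String) (description : Option String) : Bool :=
  if !pyTruthy title && !pyTruthy description then false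
  else
    let title_lower := if pyTruthy title then PySem.Chars.lower (title.getD "").toList else []
    let desc_lower := if pyTruthy description then PySem.Chars.lower (description.getD "").toList else []
    loopA title_lower desc_lower techKeywords

-- ===== PORT B =====
-- Source B's _TECH_RE.search(s): a regex that is an alternation of escaped LITERAL
-- keywords matches s exactly when at some starting position one of the
-- alternatives is a prefix of the rest of the string; this hand-ported search
-- is exact for such literal-alternation patterns.
def regexSearch (s : List Char) : Bool :=
  (List.range s.length).any (fun i =>
    techKeywords.any (fun k => PySem.Chars.startswith (s.drop i) k.toList))

def is_tech_job_alt (title : Option String) (description : Option String) : Bool :=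
  regexSearch (PySem.Chars.lower (title.getD "").toList)       -- (title or '').lower()
    || regexSearch (PySem.Chars.lower (description.getD "").toList)

-- ===== PRECONDITION & SPEC =====
def Spec_is_tech_job (title : Option String) (description : Option String) (out : Bool) : Prop := out = is_tech_job_alt title description
instance (title : Option String) (description : Option String) (out : Bool) : Decidable (Spec_is_tech_job title description out) := by unfold Spec_is_tech_job; infer_instance

-- ===== CLAIM (what is proved, stated in full; the proofs are below) =====
def Claim_equal_is_tech_job : Prop := ∀ (title : Option String) (description : Option String), Dom_is_tech_job title description → Spec_is_tech_job title description (is_tech_job title description)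

-- ===== LEMMAS AND PROOFS =====

-- the early-return keyword loop is an `any`
theorem loopA_eq_any (t d : List Char) (ks : List String) :
    loopA t d ks = ks.any (fun k => PySem.Chars.isIn k.toList t || PySem.Chars.isIn k.toList d) := by
  induction ks with
  | nil => rfl
  | cons k ks ih =>
    rw [loopA]
    cases h : (PySem.Chars.isIn k.toList t || PySem.Chars.isIn k.toList d) <;>
      simp [List.any_cons, h, ih]

theorem any_or_distrib {α : Type} (L : List α) (p q : α → Bool) :
    L.any (fun x => p x || q x) = (L.any p || L.any q) := by
  induction L with
  | nil => rfl
  | cons x L ih =>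
    simp [List.any_cons, ih, Bool.or_assoc, Bool.or_left_comm]

-- the regex alternation search finds exactly the contained keywords (keywords are nonempty)
theorem regexSearch_eq_any (s : List Char) :
    regexSearch s = techKeywords.any (fun k => PySem.Chars.isIn k.toList s) := by
  have hne : ∀ k ∈ techKeywords, k.toList ≠ ([] : List Char) := by decide
  rcases h : techKeywords.any (fun k => PySem.Chars.isIn k.toList s) with _ | _
  · -- no keyword contained ⇒ no position matches
    rw [regexSearch]
    simp only [List.any_eq_false] at h ⊢
    intro i hi kany
    simp only [List.any_eq_true] at kany
    obtain ⟨k, hk, hsw⟩ := kany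
    have hpre := (PySem.Chars.startswith_iff _ _).mp hsw
    have : PySem.Chars.isIn k.toList s = true :=
      (PySem.Chars.exists_prefix_drop_iff_isIn _ _).mp ⟨i, hpre⟩
    exact absurd this (by simpa using h k hk)
  · -- some keyword contained ⇒ some position matches
    simp only [List.any_eq_true] at h
    obtain ⟨k, hk, hin⟩ := h
    obtain ⟨j, hpre⟩ := (PySem.Chars.exists_prefix_drop_iff_isIn k.toList s).mpr hin
    have hj : j < s.length := by
      by_contra hge
      have : s.drop j = [] := List.drop_eq_nil_of_le (by omega)
      rw [this] at hpre
      exact hne k hk (List.prefix_nil.mp hpre)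
    rw [regexSearch]
    simp only [List.any_eq_true]
    exact ⟨j, by simpa using hj, ⟨k, hk, (PySem.Chars.startswith_iff _ _).mpr hpre⟩⟩

theorem regexSearch_nil : regexSearch [] = false := rfl

theorem lower_empty_of_falsy (o : Option String) (h : pyTruthy o = false) :
    PySem.Chars.lower (o.getD "").toList = [] := by
  cases o with
  | none => rfl
  | some s =>
    have hs : s = "" := by simpa [pyTruthy] using h
    subst hs; rfl

-- ===== VERDICT (by name: the statement is the Claim_ definition above) =====
theorem is_tech_job_spec : Claim_equal_is_tech_job := by
  intro title description _
  unfold Spec_is_tech_job is_tech_job is_tech_job_alt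
  have key : ∀ t d : List Char, loopA t d techKeywords = (regexSearch t || regexSearch d) := by
    intro t d
    rw [loopA_eq_any, any_or_distrib, regexSearch_eq_any, regexSearch_eq_any]
  cases htt : pyTruthy title <;> cases hdd : pyTruthy description
  · -- both falsy
    rw [lower_empty_of_falsy title htt, lower_empty_of_falsy description hdd]
    simp [regexSearch_nil]
  · -- title falsy, description truthy
    rw [lower_empty_of_falsy title htt]
    simp only [Bool.not_true, Bool.and_false]
    rw [key]
    simp [regexSearch_nil]
  · -- title truthy, description falsy
    rw [lower_empty_of_falsy description hdd]
    simp only [Bool.not_true, Bool.false_and]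
    rw [key]
    simp [regexSearch_nil]
  · -- both truthy
    simp only [Bool.not_true, Bool.false_and]
    rw [key]
    simp
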